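-- pv_equiv track=rewrite | github.com/juwkim/boj | 백준/Silver/20863. Lisp till C/Lisp till C.py | solve
-- ===== SOURCE A (Python) =====
-- def solve(tokens):
--     token = tokens.pop()
--     if token != "(":
--         return token
--     function_name = tokens.pop()
--     args = []
--     while tokens[-1] != ")": args.append(solve(tokens))
--     tokens.pop()
--     return f"{function_name}({', '.join(args)})"
-- ===== SOURCE B (Python) =====
-- def solve(tokens):
--     stack = []
--     while True:
--         token = tokens.pop()
--         if not stack and token != "(":
--             return token
--         if token == "(":
--             stack.append((tokens.pop(), []))
--         elif token == ")":
--             name, args = stack.pop()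
--             s = f"{name}({', '.join(args)})"
--             if not stack:
--                 return s
--             stack[-1][1].append(s)
--         else:
--             stack[-1][1].append(token)
-- ===== Notes on version B (the rewrite author's own statement) =====
-- stated objective: alternative
-- what changed: Replaced A's recursive-descent parser (recursion + inner while loop per call) by a single non-recursive loop over the popped tokens driven by an explicit stack of (function_name, args) frames.
import Mathlib
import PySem

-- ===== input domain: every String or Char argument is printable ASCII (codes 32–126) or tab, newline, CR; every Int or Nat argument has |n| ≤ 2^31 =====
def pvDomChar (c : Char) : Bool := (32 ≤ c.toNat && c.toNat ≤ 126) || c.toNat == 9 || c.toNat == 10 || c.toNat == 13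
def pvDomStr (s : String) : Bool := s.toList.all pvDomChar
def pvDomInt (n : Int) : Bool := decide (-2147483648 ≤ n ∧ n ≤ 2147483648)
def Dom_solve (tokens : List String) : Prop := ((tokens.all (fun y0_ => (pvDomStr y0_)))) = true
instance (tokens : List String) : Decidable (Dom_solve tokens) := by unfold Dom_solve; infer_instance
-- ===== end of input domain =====

-- B replaces A's recursive-descent parser by a single explicit-stack loop (same pops in the
-- same order; both A and B mutate `tokens` by popping, equivalence proved for the return value).

-- ===== PORT A =====
-- A is recursive with an inner while-loop; ported as a mutual pair. `tokens.pop()` = take the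
-- last element (getLast?/dropLast); `none` = IndexError. The subtype result carries the fact
-- that parsing consumes at least one token, which justifies termination.
mutual
def solveParse (ts : List String) : Option (String × {r : List String // r.length < ts.length}) :=
  match h : ts.getLast? with
  | none => none                        -- tokens.pop() on empty: IndexError
  | some token =>
    if token = "(" then
      match h2 : ts.dropLast.getLast? with
      | none => none                    -- tokens.pop() for function_name: IndexError
      | some fname =>
        match solveArgs ts.dropLast.dropLast [] with
        | none => none
        | some (args, ⟨r, hr⟩) =>
            some (fname ++ "(" ++ PySem.Str.join ", " args ++ ")",
              ⟨r, by
                have h1 : ts ≠ [] := by simpa using congrArg Option.isSome h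
                have h3 : (ts.dropLast).length = ts.length - 1 := by simp
                have h4 : (ts.dropLast.dropLast).length = ts.dropLast.length - 1 := by simp
                have h5 : ts.length ≠ 0 := by simpa [List.length_eq_zero_iff] using h1
                omega⟩)
    else
      some (token, ⟨ts.dropLast, by
        have h1 : ts ≠ [] := by simpa using congrArg Option.isSome h
        have h5 : ts.length ≠ 0 := by simpa [List.length_eq_zero_iff] using h1
        have h3 : (ts.dropLast).length = ts.length - 1 := by simp
        omega⟩)

termination_by (ts.length, 0)
decreasing_by
  apply Prod.Lex.left
  have h1 : ts ≠ [] := by simpa using congrArg Option.isSome h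
  have h5 : ts.length ≠ 0 := by simpa [List.length_eq_zero_iff] using h1
  have h3 : (ts.dropLast).length = ts.length - 1 := by simp
  have h4 : (ts.dropLast.dropLast).length = ts.dropLast.length - 1 := by simp
  omega

def solveArgs (ts : List String) (args : List String) :
    Option (List String × {r : List String // r.length ≤ ts.length}) :=
  match h : ts.getLast? with
  | none => none                        -- tokens[-1] on empty: IndexError
  | some t =>
    if t = ")" then
      some (args, ⟨ts.dropLast, by have h3 : (ts.dropLast).length = ts.length - 1 := List.length_dropLast; omega⟩)   -- tokens.pop() closing ")"
    else
      match solveParse ts with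
      | none => none
      | some (s, ⟨r, hr⟩) =>
        match solveArgs r (args ++ [s]) with
        | none => none
        | some (args', ⟨r', hr'⟩) => some (args', ⟨r', by omega⟩)
termination_by (ts.length, 1)
decreasing_by
  · apply Prod.Lex.right'; omega; omega
  · apply Prod.Lex.left; omega
end

def solve (tokens : List String) : String :=
  match solveParse tokens with
  | some (s, _) => s
  | none => ""          -- unreachable under Pre_solve (Python raises IndexError there)

-- ===== PORT B =====
-- B: one loop over the popped tokens, with an explicit stack of (function_name, args) frames.
def solveLoop (tokens : List String) (stack : List (String × List String)) : Option String :=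
  match h : tokens.getLast? with
  | none => none
  | some token =>
    let rest := tokens.dropLast
    if stack = [] ∧ token ≠ "(" then some token
    else if token = "(" then
      match rest.getLast? with
      | none => none
      | some name => solveLoop rest.dropLast ((name, []) :: stack)
    else if token = ")" then
      match stack with
      | [] => none                      -- unreachable: covered by the first branch
      | (name, args) :: stack' =>
        let s := name ++ "(" ++ PySem.Str.join ", " args ++ ")"
        match stack' with
        | [] => some s
        | (n2, a2) :: st => solveLoop rest ((n2, a2 ++ [s]) :: st)
    else
      match stack with
      | [] => none                      -- unreachable: covered by the first branch
      | (name, args) :: st => solveLoop rest ((name, args ++ [token]) :: st)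
termination_by tokens.length
decreasing_by
  all_goals
    have h1 : tokens ≠ [] := by simpa using congrArg Option.isSome h
    have : tokens.length ≠ 0 := by simpa [List.length_eq_zero_iff] using h1
  all_goals have h3 : (tokens.dropLast).length = tokens.length - 1 := by simp
  · have h4 : (tokens.dropLast.dropLast).length = tokens.dropLast.length - 1 := by simp
    omega
  · omega
  · omega

def solve_alt (tokens : List String) : String :=
  match solveLoop tokens [] with
  | some s => s
  | none => ""

-- ===== PRECONDITION & SPEC =====
-- Pre_solve: the token list, read in pop order (reversed), starts with a well-formed
-- expression — exactly the inputs on which Python A returns instead of raising IndexError.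
-- Checked by a simple state machine (open-frame depth + "a function name is expected" flag).
def wfStream : List String → Nat → Bool → Bool
  | [], _, _ => false
  | t :: rest, d, expect =>
    if expect then wfStream rest d false
    else if t = "(" then wfStream rest (d + 1) true
    else if d = 0 then true
    else if t = ")" then (if d = 1 then true else wfStream rest (d - 1) false)
    else wfStream rest d false

def Pre_solve (tokens : List String) : Prop := wfStream tokens.reverse 0 false = true
instance (tokens : List String) : Decidable (Pre_solve tokens) := by unfold Pre_solve; infer_instance

def pvWitness_solve : List String := [")", "y", "x", "f", "("]   -- pops to: ( f x y )  →  "f(x, y)"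

def Spec_solve (tokens : List String) (out : String) : Prop := out = solve_alt tokens
instance (tokens : List String) (out : String) : Decidable (Spec_solve tokens out) := by unfold Spec_solve; infer_instance

-- ===== CLAIM (what is proved, stated in full; the proofs are below) =====
def Claim_equal_solve : Prop := ∀ (tokens : List String), Dom_solve tokens → Pre_solve tokens → Spec_solve tokens (solve tokens)

-- ===== LEMMAS AND PROOFS =====

-- One-step unfolding lemmas (the ports are well-founded recursions over dependent
-- matches; these restate each step given the head token).

theorem parse_none (ts : List String) (h : ts.getLast? = none) : solveParse ts = none := by
  rw [solveParse]; split
  · rfl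
  · rename_i t hh; rw [h] at hh; cases hh

theorem parse_atom (ts : List String) (t : String) (h : ts.getLast? = some t) (ht : ¬ t = "(") :
    solveParse ts = some (t, ⟨ts.dropLast, by
      have h1 : ts ≠ [] := by intro hh; subst hh; simp at h
      have h3 : (ts.dropLast).length = ts.length - 1 := List.length_dropLast
      have h5 : ts.length ≠ 0 := by simpa [List.length_eq_zero_iff] using h1
      omega⟩) := by
  rw [solveParse]; split
  · rename_i hh; rw [h] at hh; cases hh
  · rename_i tok hh; rw [h] at hh; injection hh with hh; subst hh
    rw [if_neg ht]

theorem parse_open (ts : List String) (h : ts.getLast? = some "(") :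
    solveParse ts =
      match ts.dropLast.getLast? with
      | none => none
      | some fname =>
        match solveArgs ts.dropLast.dropLast [] with
        | none => none
        | some (args, r) =>
          some (fname ++ "(" ++ PySem.Str.join ", " args ++ ")", ⟨r.1, by
            have h1 : ts ≠ [] := by intro hh; subst hh; simp at h
            have h3 : (ts.dropLast).length = ts.length - 1 := List.length_dropLast
            have h4 : (ts.dropLast.dropLast).length = ts.dropLast.length - 1 := List.length_dropLast
            have h5 : ts.length ≠ 0 := by simpa [List.length_eq_zero_iff] using h1
            have h6 := r.2
            omega⟩) := by
  rw [solveParse]; split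
  · rename_i hh; rw [h] at hh; cases hh
  · rename_i tok hh; rw [h] at hh; injection hh with hh; subst hh
    rw [if_pos rfl]
    split
    · rename_i hh2; rw [hh2]
    · rename_i fname hh2; rw [hh2]
      cases hA : solveArgs ts.dropLast.dropLast [] with
      | none => rfl
      | some p => rfl

theorem args_none (ts : List String) (args : List String) (h : ts.getLast? = none) :
    solveArgs ts args = none := by
  rw [solveArgs]; split
  · rfl
  · rename_i t hh; rw [h] at hh; cases hh

theorem args_close (ts : List String) (args : List String) (h : ts.getLast? = some ")") :
    solveArgs ts args = some (args, ⟨ts.dropLast, by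
      have h3 : (ts.dropLast).length = ts.length - 1 := List.length_dropLast
      omega⟩) := by
  rw [solveArgs]; split
  · rename_i hh; rw [h] at hh; cases hh
  · rename_i tok hh; rw [h] at hh; injection hh with hh; subst hh
    rw [if_pos rfl]

theorem args_step (ts : List String) (args : List String) (t : String)
    (h : ts.getLast? = some t) (ht : ¬ t = ")") :
    solveArgs ts args =
      match solveParse ts with
      | none => none
      | some (s, r) =>
        match solveArgs r.1 (args ++ [s]) with
        | none => none
        | some (args', r') => some (args', ⟨r'.1, by
            have a := r.2; have b := r'.2; omega⟩) := by
  rw [solveArgs]; split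
  · rename_i hh; rw [h] at hh; cases hh
  · rename_i tok hh; rw [h] at hh; injection hh with hh; subst hh
    rw [if_neg ht]
    cases hA : solveParse ts with
    | none => rfl
    | some p =>
      obtain ⟨s, r, hr⟩ := p
      dsimp only
      cases hB : solveArgs r (args ++ [s]) with
      | none => rfl
      | some q => obtain ⟨args', r', hr'⟩ := q; rfl

theorem loop_none (tokens : List String) (stack : List (String × List String))
    (h : tokens.getLast? = none) : solveLoop tokens stack = none := by
  rw [solveLoop]; split
  · rfl
  · rename_i t hh; rw [h] at hh; cases hh

theorem loop_some (tokens : List String) (stack : List (String × List String)) (t : String)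
    (h : tokens.getLast? = some t) :
    solveLoop tokens stack =
      (if stack = [] ∧ t ≠ "(" then some t
       else if t = "(" then
         match tokens.dropLast.getLast? with
         | none => none
         | some name => solveLoop tokens.dropLast.dropLast ((name, []) :: stack)
       else if t = ")" then
         match stack with
         | [] => none
         | (name, args) :: stack' =>
           match stack' with
           | [] => some (name ++ "(" ++ PySem.Str.join ", " args ++ ")")
           | (n2, a2) :: st =>
             solveLoop tokens.dropLast
               ((n2, a2 ++ [name ++ "(" ++ PySem.Str.join ", " args ++ ")"]) :: st)
       else
         match stack with
         | [] => none
         | (name, args) :: st => solveLoop tokens.dropLast ((name, args ++ [t]) :: st)) := by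
  rw [solveLoop]; split
  · rename_i hh; rw [h] at hh; cases hh
  · rename_i tok hh; rw [h] at hh; injection hh with hh; subst hh; rfl

-- Continuation of B's loop after a finished sub-expression `s` with residual tokens `r`.
def contK (stack : List (String × List String)) (s : String) (r : List String) : Option String :=
  match stack with
  | [] => some s
  | (n, a) :: st => solveLoop r ((n, a ++ [s]) :: st)

-- Main simulation: B's loop with a frame (name, args) on top behaves like A's argument
-- loop followed by closing the frame and continuing with the rest of the stack.
theorem frame_sim : ∀ (n : Nat) (ts : List String), ts.length ≤ n →
    ∀ (name : String) (args : List String) (stack : List (String × List String)),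
    solveLoop ts ((name, args) :: stack) =
      match solveArgs ts args with
      | none => none
      | some (args', ⟨r, _⟩) =>
          contK stack (name ++ "(" ++ PySem.Str.join ", " args' ++ ")") r := by
  intro n
  induction n with
  | zero =>
    intro ts hts name args stack
    have hnil : ts = [] := List.length_eq_zero_iff.mp (Nat.le_zero.mp hts)
    subst hnil
    rw [loop_none _ _ rfl, args_none _ _ rfl]
  | succ n ih =>
    intro ts hts name args stack
    cases hg : ts.getLast? with
    | none => rw [loop_none _ _ hg, args_none _ _ hg]
    | some t =>
      have hne : ts ≠ [] := by intro hh; subst hh; simp at hg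
      have hlen : ts.dropLast.length = ts.length - 1 := List.length_dropLast
      have hpos : ts.length ≠ 0 := by simpa [List.length_eq_zero_iff] using hne
      rw [loop_some ts _ t hg]
      by_cases ht : t = "("
      · subst ht
        rw [if_neg (by simp), if_pos rfl]
        rw [args_step ts args "(" hg (by decide), parse_open ts hg]
        have hlen2 : ts.dropLast.dropLast.length = ts.dropLast.length - 1 := List.length_dropLast
        cases hg2 : ts.dropLast.getLast? with
        | none => rfl
        | some name2 =>
          dsimp only
          rw [ih ts.dropLast.dropLast (by omega) name2 [] ((name, args) :: stack)]
          cases hA : solveArgs ts.dropLast.dropLast [] with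
          | none => rfl
          | some p =>
            obtain ⟨args2, r2, hr2⟩ := p
            dsimp only [contK]
            rw [ih r2 (by omega) name
              (args ++ [name2 ++ "(" ++ PySem.Str.join ", " args2 ++ ")"]) stack]
            cases hB : solveArgs r2 (args ++ [name2 ++ "(" ++ PySem.Str.join ", " args2 ++ ")"]) with
            | none => rfl
            | some q => obtain ⟨args3, r3, hr3⟩ := q; rfl
      · by_cases hc : t = ")"
        · subst hc
          rw [if_neg (by simp), if_neg (by decide), if_pos rfl,
            args_close ts args hg]
          cases stack with
          | nil => rfl
          | cons top st => rfl
        · rw [if_neg (by simp [ht]), if_neg ht, if_neg hc,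
            args_step ts args t hg hc, parse_atom ts t hg ht]
          dsimp only
          rw [ih ts.dropLast (by omega) name (args ++ [t]) stack]
          cases hB : solveArgs ts.dropLast (args ++ [t]) with
          | none => rfl
          | some q => obtain ⟨args3, r3, hr3⟩ := q; rfl

theorem solve_eq_alt (ts : List String) : solve ts = solve_alt ts := by
  unfold solve solve_alt
  cases hg : ts.getLast? with
  | none => rw [loop_none _ _ hg, parse_none _ hg]
  | some t =>
    rw [loop_some ts _ t hg]
    by_cases ht : t = "("
    · subst ht
      rw [if_neg (by simp), if_pos rfl, parse_open ts hg]
      cases hg2 : ts.dropLast.getLast? with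
      | none => rfl
      | some name2 =>
        dsimp only
        rw [frame_sim ts.dropLast.dropLast.length ts.dropLast.dropLast (le_refl _) name2 [] []]
        cases hA : solveArgs ts.dropLast.dropLast [] with
        | none => rfl
        | some p => obtain ⟨args2, r2, hr2⟩ := p; rfl
    · rw [if_pos ⟨rfl, ht⟩, parse_atom ts t hg ht]

-- ===== VERDICT (by name: the statement is the Claim_ definition above) =====
theorem solve_spec : Claim_equal_solve := by
  intro tokens _ _
  unfold Spec_solve
  exact solve_eq_alt tokens
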